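-- pv_equiv track=rewrite | github.com/pypi-data/pypi-mirror-326 | packages/boomba/boomba-0.1.0b4-py3-none-any.whl/boomba/core/schedule.py | _weekday_to_int
-- ===== SOURCE A (Python) =====
-- from enum import Enum
--
-- class WeekDay(Enum):
--     mon = 0
--     tue = 1
--     wed = 2
--     thu = 3
--     fri = 4
--     sat = 5
--     sun = 6
--
-- def _weekday_to_int(weekday: str) -> int:
--     if weekday is None:
--         return '*'
--
--     if '/' in weekday:
--         raise ValueError("The weekday cannot contain the '/' character.")
--
--     for k, v in WeekDay.__members__.items():
--         weekday = weekday.replace(k, str(v.value))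
--
--     return weekday
-- ===== SOURCE B (Python) =====
-- # Single left-to-right pass: at each position try the 3-char token in a dict
-- # (one scan with O(1) lookup) instead of seven sequential full-string .replace() passes.
-- _TABLE = {'mon': '0', 'tue': '1', 'wed': '2', 'thu': '3',
--           'fri': '4', 'sat': '5', 'sun': '6'}
--
-- def _weekday_to_int(weekday: str) -> int:
--     if weekday is None:
--         return '*'
--
--     if '/' in weekday:
--         raise ValueError("The weekday cannot contain the '/' character.")
--
--     out = []
--     i = 0
--     n = len(weekday)
--     while i < n:
--         tok = weekday[i:i + 3]
--         if tok in _TABLE: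
--             out.append(_TABLE[tok])
--             i += 3
--         else:
--             out.append(weekday[i])
--             i += 1
--     return ''.join(out)
-- ===== Notes on version B (the rewrite author's own statement) =====
-- stated objective: alternative
-- what changed: B makes one left-to-right pass over the string, replacing each 3-char token found in a name->digit dict, instead of A's seven sequential full-string .replace() passes; Pre_ excludes strings containing '/' (A raises ValueError) and strings containing 'satue' or 'sathu', the only overlaps where A's fixed replace order and B's leftmost scan pick different equally-accidental tokenisations.
-- outside the precondition, e.g. on _weekday_to_int('satue'): A returns 'sa1', B returns '5ue'; on _weekday_to_int('sathu'): A returns 'sa3', B returns '5hu'; on _weekday_to_int('/'): A raises ValueError, B raises ValueError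
import Mathlib
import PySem

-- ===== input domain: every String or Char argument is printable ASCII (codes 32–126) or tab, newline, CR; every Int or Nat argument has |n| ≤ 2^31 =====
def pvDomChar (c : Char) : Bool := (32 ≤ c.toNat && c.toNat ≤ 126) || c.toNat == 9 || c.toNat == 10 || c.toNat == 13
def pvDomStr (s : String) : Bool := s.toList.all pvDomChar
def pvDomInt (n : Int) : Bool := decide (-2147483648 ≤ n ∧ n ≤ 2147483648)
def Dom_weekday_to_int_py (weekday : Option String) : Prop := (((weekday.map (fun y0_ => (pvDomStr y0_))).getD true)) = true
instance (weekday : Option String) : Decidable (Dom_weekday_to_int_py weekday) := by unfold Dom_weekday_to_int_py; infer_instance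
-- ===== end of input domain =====

-- B replaces A's seven sequential full-string .replace passes by one left-to-right
-- pass with a name→digit table; equivalence is proved on Pre_ (see its comment).

-- ===== PORT A =====
-- WeekDay.__members__.items() as the ordered (name, str(value)) list A iterates over.
def wdMembers : List (String × String) :=
  [("mon", "0"), ("tue", "1"), ("wed", "2"), ("thu", "3"), ("fri", "4"), ("sat", "5"), ("sun", "6")]

-- A: None → '*'; '/' raises (excluded by Pre_); else fold the seven replaces in order.
def weekday_to_int_py (weekday : Option String) : String :=
  match weekday with
  | none => "*"
  | some w => wdMembers.foldl (fun acc kv => PySem.Str.replace acc kv.1 kv.2) w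

-- ===== PORT B =====
def wdTable : PySem.Dict String String :=
  PySem.Dict.ofList [("mon", "0"), ("tue", "1"), ("wed", "2"), ("thu", "3"), ("fri", "4"), ("sat", "5"), ("sun", "6")]

-- Source B's while loop over positions: take the 3-char token at i; on a table hit emit
-- the digit and advance 3, else emit the char and advance 1.
def altGo (l : List Char) : List Char :=
  match l with
  | [] => []
  | c :: t =>
    match wdTable.get? (String.ofList ((c :: t).take 3)) with
    | some d => d.toList ++ altGo ((c :: t).drop 3)
    | none => c :: altGo t
termination_by l.length
decreasing_by all_goals (simp; try omega)

def weekday_to_int_py_alt (weekday : Option String) : String :=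
  match weekday with
  | none => "*"
  | some w => String.ofList (altGo w.toList)

-- ===== PRECONDITION & SPEC =====
-- Pre_ excludes strings containing '/' (A raises ValueError there, B likewise) and
-- strings containing 'satue' or 'sathu' — the only overlaps of the seven names, where
-- A's fixed replace order and B's leftmost scan pick different, equally accidental
-- tokenisations (A: 'satue'→'sa1', B: 'satue'→'5ue').
def Pre_weekday_to_int_py (weekday : Option String) : Prop :=
  ((weekday.map (fun s => !PySem.Str.isIn "/" s && !PySem.Str.isIn "satue" s && !PySem.Str.isIn "sathu" s)).getD true) = true
instance (weekday : Option String) : Decidable (Pre_weekday_to_int_py weekday) := by unfold Pre_weekday_to_int_py; infer_instance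

def pvWitness_weekday_to_int_py : Option String := some "mon,wed-fri"

def Spec_weekday_to_int_py (weekday : Option String) (out : String) : Prop := out = weekday_to_int_py_alt weekday
instance (weekday : Option String) (out : String) : Decidable (Spec_weekday_to_int_py weekday out) := by unfold Spec_weekday_to_int_py; infer_instance

-- ===== CLAIM (what is proved, stated in full; the proofs are below) =====
def Claim_equal_weekday_to_int_py : Prop := ∀ (weekday : Option String), Dom_weekday_to_int_py weekday → Pre_weekday_to_int_py weekday → Spec_weekday_to_int_py weekday (weekday_to_int_py weekday)

-- ===== LEMMAS AND PROOFS =====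

-- One replace pass 's.replace(abc, d)' on char lists, in structural form.
def rep3 (a b c d : Char) : List Char → List Char
  | [] => []
  | x :: t => if x = a ∧ t.take 2 = [b, c] then d :: rep3 a b c d (t.drop 2) else x :: rep3 a b c d t
termination_by l => l.length
decreasing_by all_goals (simp; try omega)

theorem go3 (a b c d : Char) : ∀ (fuel : Nat) (l acc : List Char), l.length ≤ fuel →
    PySem.Chars.replace.go [a,b,c] [d] fuel l acc = acc.reverse ++ rep3 a b c d l := by
  intro fuel
  induction fuel with
  | zero => intro l acc h; have : l = [] := by cases l <;> simp_all
            subst this; simp [PySem.Chars.replace.go, rep3]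
  | succ n ih =>
    intro l acc h
    cases l with
    | nil => simp [PySem.Chars.replace.go, rep3]
    | cons x t =>
      rw [PySem.Chars.replace.go]
      by_cases hp : x = a ∧ t.take 2 = [b, c]
      · have hpre : List.isPrefixOf [a,b,c] (x :: t) = true := by
          simp only [List.isPrefixOf_iff_prefix, List.cons_prefix_cons]
          exact ⟨hp.1.symm, by rw [List.prefix_iff_eq_take]; exact hp.2.symm⟩
        rw [if_pos hpre]
        have hd : List.drop ([a,b,c] : List Char).length (x :: t) = t.drop 2 := by simp
        rw [hd, ih _ _ (by simp at h ⊢; omega)]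
        simp [rep3, hp]
      · have hpre : ¬ (List.isPrefixOf [a,b,c] (x :: t) = true) := by
          simp only [List.isPrefixOf_iff_prefix, List.cons_prefix_cons]
          rintro ⟨hx, hbc⟩
          exact hp ⟨hx.symm, by rw [List.prefix_iff_eq_take] at hbc; exact hbc.symm⟩
        rw [if_neg hpre]
        rw [ih _ _ (by simp at h ⊢; omega)]
        rw [rep3, if_neg hp]
        simp

theorem replace3 (a b c d : Char) (l : List Char) :
    PySem.Chars.replace l [a,b,c] [d] = rep3 a b c d l := by
  rw [PySem.Chars.replace]
  simp only [List.isEmpty_cons, if_false, Bool.false_eq_true]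
  exact go3 a b c d l.length l [] le_rfl

-- A's seven passes in their enum order, on char lists.
def chainA (l : List Char) : List Char :=
  rep3 's' 'u' 'n' '6' (rep3 's' 'a' 't' '5' (rep3 'f' 'r' 'i' '4' (rep3 't' 'h' 'u' '3'
    (rep3 'w' 'e' 'd' '2' (rep3 't' 'u' 'e' '1' (rep3 'm' 'o' 'n' '0' l))))))

theorem portA_eq (s : String) : weekday_to_int_py (some s) = String.ofList (chainA s.toList) := by
  simp only [weekday_to_int_py, wdMembers, List.foldl, PySem.Str.replace, String.toList_ofList]
  congr 1
  show PySem.Chars.replace (PySem.Chars.replace (PySem.Chars.replace (PySem.Chars.replace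
      (PySem.Chars.replace (PySem.Chars.replace (PySem.Chars.replace s.toList
      ['m','o','n'] ['0']) ['t','u','e'] ['1']) ['w','e','d'] ['2']) ['t','h','u'] ['3'])
      ['f','r','i'] ['4']) ['s','a','t'] ['5']) ['s','u','n'] ['6'] = chainA s.toList
  rw [replace3, replace3, replace3, replace3, replace3, replace3, replace3]
  rfl

theorem rep3_fire (a b c d : Char) (r : List Char) :
    rep3 a b c d (a :: b :: c :: r) = d :: rep3 a b c d r := by
  rw [rep3, if_pos (by simp)]
  simp

theorem rep3_step {a b c d x : Char} {t : List Char} (h : ¬ (x = a ∧ t.take 2 = [b, c])) :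
    rep3 a b c d (x :: t) = x :: rep3 a b c d t := by
  rw [rep3, if_neg h]

theorem prefix_rep3 {a b c d : Char} :
    ∀ (y : List Char), ∀ {p : List Char}, d ∉ p → p <+: rep3 a b c d y → p <+: y := by
  intro y
  induction y using rep3.induct a b c with
  | case1 => intro p _ h; simpa [rep3] using h
  | case2 x t hc ih =>
    intro p hd hpre
    rw [rep3, if_pos hc] at hpre
    cases p with
    | nil => exact List.nil_prefix
    | cons q p' =>
      rw [List.cons_prefix_cons] at hpre
      exact absurd (hpre.1 ▸ List.mem_cons_self) hd
  | case3 x t hc ih =>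
    intro p hd hpre
    rw [rep3, if_neg hc] at hpre
    cases p with
    | nil => exact List.nil_prefix
    | cons q p' =>
      rw [List.cons_prefix_cons] at hpre
      have := ih (by intro hm; exact hd (List.mem_cons_of_mem _ hm)) hpre.2
      exact List.cons_prefix_cons.mpr ⟨hpre.1, this⟩

theorem take2_rep3 {a b c d p q : Char} {y : List Char} (hp : d ≠ p) (hq : d ≠ q)
    (h : (rep3 a b c d y).take 2 = [p, q]) : y.take 2 = [p, q] := by
  have h1 : [p, q] <+: rep3 a b c d y := by
    rw [List.prefix_iff_eq_take]; exact h.symm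
  have h2 := prefix_rep3 y (by simp; exact ⟨hp, hq⟩) h1
  rw [List.prefix_iff_eq_take] at h2; exact h2.symm

theorem chain_mon (r : List Char) : chainA ('m'::'o'::'n'::r) = '0' :: chainA r := by
  simp [chainA, rep3_fire, rep3_step]

theorem chain_tue (r : List Char) : chainA ('t'::'u'::'e'::r) = '1' :: chainA r := by
  simp [chainA, rep3_fire, rep3_step]

theorem chain_wed (r : List Char) : chainA ('w'::'e'::'d'::r) = '2' :: chainA r := by
  simp [chainA, rep3_fire, rep3_step]

theorem chain_thu (r : List Char) : chainA ('t'::'h'::'u'::r) = '3' :: chainA r := by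
  simp [chainA, rep3_fire, rep3_step]

theorem chain_fri (r : List Char) : chainA ('f'::'r'::'i'::r) = '4' :: chainA r := by
  simp [chainA, rep3_fire, rep3_step]

theorem chain_sat (r : List Char) (hue : r.take 2 ≠ ['u','e']) (hhu : r.take 2 ≠ ['h','u']) :
    chainA ('s'::'a'::'t'::r) = '5' :: chainA r := by
  have z1 : List.take 2 (rep3 'm' 'o' 'n' '0' r) ≠ ['u','e'] :=
    fun h => hue (take2_rep3 (by decide) (by decide) h)
  have z2 : List.take 2 (rep3 'w' 'e' 'd' '2' (rep3 't' 'u' 'e' '1' (rep3 'm' 'o' 'n' '0' r))) ≠ ['h','u'] :=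
    fun h => hhu (take2_rep3 (by decide) (by decide) (take2_rep3 (by decide) (by decide) (take2_rep3 (by decide) (by decide) h)))
  simp [chainA, rep3_fire, rep3_step, z1, z2]

theorem chain_sun (r : List Char) : chainA ('s'::'u'::'n'::r) = '6' :: chainA r := by
  simp [chainA, rep3_fire, rep3_step]

theorem chain_step (c : Char) (t : List Char)
    (h1 : ¬ (c = 'm' ∧ t.take 2 = ['o','n'])) (h2 : ¬ (c = 't' ∧ t.take 2 = ['u','e']))
    (h3 : ¬ (c = 'w' ∧ t.take 2 = ['e','d'])) (h4 : ¬ (c = 't' ∧ t.take 2 = ['h','u']))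
    (h5 : ¬ (c = 'f' ∧ t.take 2 = ['r','i'])) (h6 : ¬ (c = 's' ∧ t.take 2 = ['a','t']))
    (h7 : ¬ (c = 's' ∧ t.take 2 = ['u','n'])) :
    chainA (c :: t) = c :: chainA t := by
  simp only [chainA]
  rw [rep3_step (fun h => h1 ⟨h.1, h.2⟩)]
  rw [rep3_step (fun h => h2 ⟨h.1, take2_rep3 (by decide) (by decide) (h.2)⟩)]
  rw [rep3_step (fun h => h3 ⟨h.1, take2_rep3 (by decide) (by decide) (take2_rep3 (by decide) (by decide) (h.2))⟩)]
  rw [rep3_step (fun h => h4 ⟨h.1, take2_rep3 (by decide) (by decide) (take2_rep3 (by decide) (by decide) (take2_rep3 (by decide) (by decide) (h.2)))⟩)]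
  rw [rep3_step (fun h => h5 ⟨h.1, take2_rep3 (by decide) (by decide) (take2_rep3 (by decide) (by decide) (take2_rep3 (by decide) (by decide) (take2_rep3 (by decide) (by decide) (h.2))))⟩)]
  rw [rep3_step (fun h => h6 ⟨h.1, take2_rep3 (by decide) (by decide) (take2_rep3 (by decide) (by decide) (take2_rep3 (by decide) (by decide) (take2_rep3 (by decide) (by decide) (take2_rep3 (by decide) (by decide) (h.2)))))⟩)]
  rw [rep3_step (fun h => h7 ⟨h.1, take2_rep3 (by decide) (by decide) (take2_rep3 (by decide) (by decide) (take2_rep3 (by decide) (by decide) (take2_rep3 (by decide) (by decide) (take2_rep3 (by decide) (by decide) (take2_rep3 (by decide) (by decide) (h.2))))))⟩)]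

theorem altGo_cons (c : Char) (t : List Char) :
    altGo (c :: t) = match wdTable.get? (String.ofList ((c :: t).take 3)) with
      | some d => d.toList ++ altGo ((c :: t).drop 3)
      | none => c :: altGo t := by
  rw [altGo]

theorem main_chain_altGo : ∀ (n : Nat) (l : List Char), l.length ≤ n →
    ¬ (['s','a','t','u','e'] <:+: l) → ¬ (['s','a','t','h','u'] <:+: l) →
    chainA l = altGo l := by
  intro n
  induction n with
  | zero =>
    intro l h _ _
    have : l = [] := by cases l <;> simp_all
    subst this
    simp [chainA, rep3, altGo]
  | succ n ih =>
    intro l hlen h1 h2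
    match l with
    | [] => simp [chainA, rep3, altGo]
    | c :: t =>
      have hsub1 : ¬ (['s','a','t','u','e'] <:+: t) := fun h => h1 (List.infix_cons h)
      have hsub2 : ¬ (['s','a','t','h','u'] <:+: t) := fun h => h2 (List.infix_cons h)
      by_cases e1 : c :: t.take 2 = ['m', 'o', 'n']
      · obtain ⟨hc, ht2⟩ := List.cons_eq_cons.mp e1
        subst hc
        have hT : t = 'o' :: 'n' :: t.drop 2 := by
          conv_lhs => rw [← List.take_append_drop 2 t]
          rw [ht2]; rfl
        have hlen' : (t.drop 2).length ≤ n := by simp at hlen ⊢; omega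
        have i1 : ¬ (['s','a','t','u','e'] <:+: t.drop 2) :=
          fun h => hsub1 (h.trans (List.drop_suffix 2 t).isInfix)
        have i2 : ¬ (['s','a','t','h','u'] <:+: t.drop 2) :=
          fun h => hsub2 (h.trans (List.drop_suffix 2 t).isInfix)
        have hg : wdTable.get? (String.ofList ['m', 'o', 'n']) = some "0" := by decide
        have hA : altGo ('m' :: t) = '0' :: altGo (t.drop 2) := by
          rw [altGo_cons, show (('m' :: t).take 3) = 'm' :: t.take 2 from rfl, ht2, hg]; rfl
        rw [hA]
        conv_lhs => rw [hT]
        rw [chain_mon, ih _ hlen' i1 i2]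
      by_cases e2 : c :: t.take 2 = ['t', 'u', 'e']
      · obtain ⟨hc, ht2⟩ := List.cons_eq_cons.mp e2
        subst hc
        have hT : t = 'u' :: 'e' :: t.drop 2 := by
          conv_lhs => rw [← List.take_append_drop 2 t]
          rw [ht2]; rfl
        have hlen' : (t.drop 2).length ≤ n := by simp at hlen ⊢; omega
        have i1 : ¬ (['s','a','t','u','e'] <:+: t.drop 2) :=
          fun h => hsub1 (h.trans (List.drop_suffix 2 t).isInfix)
        have i2 : ¬ (['s','a','t','h','u'] <:+: t.drop 2) :=
          fun h => hsub2 (h.trans (List.drop_suffix 2 t).isInfix)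
        have hg : wdTable.get? (String.ofList ['t', 'u', 'e']) = some "1" := by decide
        have hA : altGo ('t' :: t) = '1' :: altGo (t.drop 2) := by
          rw [altGo_cons, show (('t' :: t).take 3) = 't' :: t.take 2 from rfl, ht2, hg]; rfl
        rw [hA]
        conv_lhs => rw [hT]
        rw [chain_tue, ih _ hlen' i1 i2]
      by_cases e3 : c :: t.take 2 = ['w', 'e', 'd']
      · obtain ⟨hc, ht2⟩ := List.cons_eq_cons.mp e3
        subst hc
        have hT : t = 'e' :: 'd' :: t.drop 2 := by
          conv_lhs => rw [← List.take_append_drop 2 t]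
          rw [ht2]; rfl
        have hlen' : (t.drop 2).length ≤ n := by simp at hlen ⊢; omega
        have i1 : ¬ (['s','a','t','u','e'] <:+: t.drop 2) :=
          fun h => hsub1 (h.trans (List.drop_suffix 2 t).isInfix)
        have i2 : ¬ (['s','a','t','h','u'] <:+: t.drop 2) :=
          fun h => hsub2 (h.trans (List.drop_suffix 2 t).isInfix)
        have hg : wdTable.get? (String.ofList ['w', 'e', 'd']) = some "2" := by decide
        have hA : altGo ('w' :: t) = '2' :: altGo (t.drop 2) := by
          rw [altGo_cons, show (('w' :: t).take 3) = 'w' :: t.take 2 from rfl, ht2, hg]; rfl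
        rw [hA]
        conv_lhs => rw [hT]
        rw [chain_wed, ih _ hlen' i1 i2]
      by_cases e4 : c :: t.take 2 = ['t', 'h', 'u']
      · obtain ⟨hc, ht2⟩ := List.cons_eq_cons.mp e4
        subst hc
        have hT : t = 'h' :: 'u' :: t.drop 2 := by
          conv_lhs => rw [← List.take_append_drop 2 t]
          rw [ht2]; rfl
        have hlen' : (t.drop 2).length ≤ n := by simp at hlen ⊢; omega
        have i1 : ¬ (['s','a','t','u','e'] <:+: t.drop 2) :=
          fun h => hsub1 (h.trans (List.drop_suffix 2 t).isInfix)
        have i2 : ¬ (['s','a','t','h','u'] <:+: t.drop 2) :=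
          fun h => hsub2 (h.trans (List.drop_suffix 2 t).isInfix)
        have hg : wdTable.get? (String.ofList ['t', 'h', 'u']) = some "3" := by decide
        have hA : altGo ('t' :: t) = '3' :: altGo (t.drop 2) := by
          rw [altGo_cons, show (('t' :: t).take 3) = 't' :: t.take 2 from rfl, ht2, hg]; rfl
        rw [hA]
        conv_lhs => rw [hT]
        rw [chain_thu, ih _ hlen' i1 i2]
      by_cases e5 : c :: t.take 2 = ['f', 'r', 'i']
      · obtain ⟨hc, ht2⟩ := List.cons_eq_cons.mp e5
        subst hc
        have hT : t = 'r' :: 'i' :: t.drop 2 := by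
          conv_lhs => rw [← List.take_append_drop 2 t]
          rw [ht2]; rfl
        have hlen' : (t.drop 2).length ≤ n := by simp at hlen ⊢; omega
        have i1 : ¬ (['s','a','t','u','e'] <:+: t.drop 2) :=
          fun h => hsub1 (h.trans (List.drop_suffix 2 t).isInfix)
        have i2 : ¬ (['s','a','t','h','u'] <:+: t.drop 2) :=
          fun h => hsub2 (h.trans (List.drop_suffix 2 t).isInfix)
        have hg : wdTable.get? (String.ofList ['f', 'r', 'i']) = some "4" := by decide
        have hA : altGo ('f' :: t) = '4' :: altGo (t.drop 2) := by
          rw [altGo_cons, show (('f' :: t).take 3) = 'f' :: t.take 2 from rfl, ht2, hg]; rfl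
        rw [hA]
        conv_lhs => rw [hT]
        rw [chain_fri, ih _ hlen' i1 i2]
      by_cases e6 : c :: t.take 2 = ['s', 'a', 't']
      · obtain ⟨hc, ht2⟩ := List.cons_eq_cons.mp e6
        subst hc
        have hT : t = 'a' :: 't' :: t.drop 2 := by
          conv_lhs => rw [← List.take_append_drop 2 t]
          rw [ht2]; rfl
        have hlen' : (t.drop 2).length ≤ n := by simp at hlen ⊢; omega
        have i1 : ¬ (['s','a','t','u','e'] <:+: t.drop 2) :=
          fun h => hsub1 (h.trans (List.drop_suffix 2 t).isInfix)
        have i2 : ¬ (['s','a','t','h','u'] <:+: t.drop 2) :=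
          fun h => hsub2 (h.trans (List.drop_suffix 2 t).isInfix)
        have hue : (t.drop 2).take 2 ≠ ['u','e'] := by
          intro h
          apply h1
          have hT2 : t.drop 2 = 'u' :: 'e' :: (t.drop 2).drop 2 := by
            conv_lhs => rw [← List.take_append_drop 2 (t.drop 2)]
            rw [h]; rfl
          have e : ('s' :: t) = 's' :: 'a' :: 't' :: (t.drop 2) := by conv_lhs => rw [hT]
          have e2 : ('s' :: t) = ['s','a','t','u','e'] ++ (t.drop 2).drop 2 := by
            rw [e]; conv_lhs => rw [hT2]
            rfl
          exact List.IsPrefix.isInfix ⟨_, e2.symm⟩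
        have hhu : (t.drop 2).take 2 ≠ ['h','u'] := by
          intro h
          apply h2
          have hT2 : t.drop 2 = 'h' :: 'u' :: (t.drop 2).drop 2 := by
            conv_lhs => rw [← List.take_append_drop 2 (t.drop 2)]
            rw [h]; rfl
          have e : ('s' :: t) = 's' :: 'a' :: 't' :: (t.drop 2) := by conv_lhs => rw [hT]
          have e2 : ('s' :: t) = ['s','a','t','h','u'] ++ (t.drop 2).drop 2 := by
            rw [e]; conv_lhs => rw [hT2]
            rfl
          exact List.IsPrefix.isInfix ⟨_, e2.symm⟩
        have hg : wdTable.get? (String.ofList ['s', 'a', 't']) = some "5" := by decide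
        have hA : altGo ('s' :: t) = '5' :: altGo (t.drop 2) := by
          rw [altGo_cons, show (('s' :: t).take 3) = 's' :: t.take 2 from rfl, ht2, hg]; rfl
        rw [hA]
        conv_lhs => rw [hT]
        rw [chain_sat _ hue hhu, ih _ hlen' i1 i2]
      by_cases e7 : c :: t.take 2 = ['s', 'u', 'n']
      · obtain ⟨hc, ht2⟩ := List.cons_eq_cons.mp e7
        subst hc
        have hT : t = 'u' :: 'n' :: t.drop 2 := by
          conv_lhs => rw [← List.take_append_drop 2 t]
          rw [ht2]; rfl
        have hlen' : (t.drop 2).length ≤ n := by simp at hlen ⊢; omega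
        have i1 : ¬ (['s','a','t','u','e'] <:+: t.drop 2) :=
          fun h => hsub1 (h.trans (List.drop_suffix 2 t).isInfix)
        have i2 : ¬ (['s','a','t','h','u'] <:+: t.drop 2) :=
          fun h => hsub2 (h.trans (List.drop_suffix 2 t).isInfix)
        have hg : wdTable.get? (String.ofList ['s', 'u', 'n']) = some "6" := by decide
        have hA : altGo ('s' :: t) = '6' :: altGo (t.drop 2) := by
          rw [altGo_cons, show (('s' :: t).take 3) = 's' :: t.take 2 from rfl, ht2, hg]; rfl
        rw [hA]
        conv_lhs => rw [hT]
        rw [chain_sun, ih _ hlen' i1 i2]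
      -- no name matches at this position
      have hnone : wdTable.get? (String.ofList (c :: t.take 2)) = none := by
        rw [PySem.Dict.get?_eq_none_iff_not_mem_keys]
        intro hk
        have hkeys : wdTable.keys = ["mon","tue","wed","thu","fri","sat","sun"] := by decide
        rw [hkeys] at hk
        simp only [List.mem_cons, List.not_mem_nil, or_false] at hk
        rcases hk with h|h|h|h|h|h|h
        · exact e1 (by simpa using congrArg String.toList h)
        · exact e2 (by simpa using congrArg String.toList h)
        · exact e3 (by simpa using congrArg String.toList h)
        · exact e4 (by simpa using congrArg String.toList h)
        · exact e5 (by simpa using congrArg String.toList h)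
        · exact e6 (by simpa using congrArg String.toList h)
        · exact e7 (by simpa using congrArg String.toList h)
      have hA : altGo (c :: t) = c :: altGo t := by
        rw [altGo_cons, show (((c :: t)).take 3) = c :: t.take 2 from rfl, hnone]
      rw [hA]
      rw [chain_step c t (fun h => e1 (by rw [h.1, h.2])) (fun h => e2 (by rw [h.1, h.2]))
        (fun h => e3 (by rw [h.1, h.2])) (fun h => e4 (by rw [h.1, h.2]))
        (fun h => e5 (by rw [h.1, h.2])) (fun h => e6 (by rw [h.1, h.2]))
        (fun h => e7 (by rw [h.1, h.2]))]
      rw [ih t (by simp at hlen; omega) hsub1 hsub2]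

-- ===== VERDICT (by name: the statement is the Claim_ definition above) =====
theorem weekday_to_int_py_spec : Claim_equal_weekday_to_int_py := by
  intro weekday _hdom hpre
  cases weekday with
  | none => rfl
  | some s =>
    simp only [Pre_weekday_to_int_py, Option.map_some, Option.getD_some, Bool.and_eq_true,
      Bool.not_eq_eq_eq_not, Bool.not_true] at hpre
    have h1 : ¬ (['s','a','t','u','e'] <:+: s.toList) := by
      intro h
      have : PySem.Str.isIn "satue" s = true := (PySem.Str.isIn_iff_infix _ _).mpr h
      rw [hpre.1.2] at this
      exact Bool.false_ne_true this
    have h2 : ¬ (['s','a','t','h','u'] <:+: s.toList) := by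
      intro h
      have : PySem.Str.isIn "sathu" s = true := (PySem.Str.isIn_iff_infix _ _).mpr h
      rw [hpre.2] at this
      exact Bool.false_ne_true this
    show weekday_to_int_py (some s) = weekday_to_int_py_alt (some s)
    rw [portA_eq]
    show String.ofList (chainA s.toList) = String.ofList (altGo s.toList)
    rw [main_chain_altGo s.toList.length s.toList le_rfl h1 h2]
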